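-- pv_equiv track=rewrite | github.com/MattKovtun/Jewel_master | main/for_one_gem.py | new_sort
-- ===== SOURCE A (Python) =====
-- def new_sort(lst, color):
--     new_lst = []
--     #new_lst = sorted(lst, key=lambda x: x[0])
--     for i in range(len(lst)):
--         is_duplicate = False
--         for j in range(len(new_lst)):
--             if abs(lst[i][0] - new_lst[j][1][0]) < 4 and abs(lst[i][1] - new_lst[j][1][1]) < 4:
--                 is_duplicate = True
--         if not is_duplicate:
--             new_lst.append((color,lst[i]))
--     new_lst.sort(key=lambda x: x[1][0])
--     return new_lst
-- ===== SOURCE B (Python) =====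
-- def new_sort(lst, color):
--     grid = {}
--     kept = []
--     for p in lst:
--         cell = (p[0] // 4, p[1] // 4)
--         dup = False
--         for dx in (-1, 0, 1):
--             for dy in (-1, 0, 1):
--                 for q in grid.get((cell[0] + dx, cell[1] + dy), []):
--                     if abs(p[0] - q[0]) < 4 and abs(p[1] - q[1]) < 4:
--                         dup = True
--         if not dup:
--             grid.setdefault(cell, []).append(p)
--             kept.append((color, p))
--     kept.sort(key=lambda t: t[1][0])
--     return kept
-- ===== Notes on version B (the rewrite author's own statement) =====
-- stated objective: alternative
-- what changed: Replaced the scan of all previously kept points by a spatial hash grid with cell size 4 that checks only the 9 neighboring buckets for a near-duplicate.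
-- outside the precondition, e.g. on new_sort([(1,), (9,)], 'c'): A returns [('c', (1,)), ('c', (9,))], B raises IndexError
import Mathlib
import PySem

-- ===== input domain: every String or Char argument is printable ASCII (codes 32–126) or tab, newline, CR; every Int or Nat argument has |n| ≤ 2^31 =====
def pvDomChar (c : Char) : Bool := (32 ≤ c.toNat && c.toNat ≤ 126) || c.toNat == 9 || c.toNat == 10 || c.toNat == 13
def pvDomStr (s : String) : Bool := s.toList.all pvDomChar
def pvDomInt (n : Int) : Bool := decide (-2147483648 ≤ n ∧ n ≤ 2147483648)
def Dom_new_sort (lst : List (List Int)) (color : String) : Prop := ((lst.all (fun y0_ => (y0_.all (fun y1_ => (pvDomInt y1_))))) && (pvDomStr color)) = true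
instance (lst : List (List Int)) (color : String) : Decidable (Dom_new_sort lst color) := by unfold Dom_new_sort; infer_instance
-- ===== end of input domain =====

-- B (alternative algorithm) replaces A's scan of all previously kept points by a spatial
-- hash grid (cell size 4; only the 9 neighboring buckets are checked); returns proved equal.

-- ===== PORT A =====
def new_sort (lst : List (List Int)) (color : String) : List (String × List Int) :=
  let new_lst := (PySem.List.pyRange 0 (lst.length : Int) 1).foldl
    (fun new_lst i =>
      let is_duplicate := (PySem.List.pyRange 0 (new_lst.length : Int) 1).foldl
        (fun b j =>
          if |PySem.List.pyGetD (PySem.List.pyGetD lst i []) 0 0 -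
                PySem.List.pyGetD (PySem.List.pyGetD new_lst j ("", [])).2 0 0| < 4 ∧
             |PySem.List.pyGetD (PySem.List.pyGetD lst i []) 1 0 -
                PySem.List.pyGetD (PySem.List.pyGetD new_lst j ("", [])).2 1 0| < 4
          then true else b) false
      if is_duplicate then new_lst else new_lst ++ [(color, PySem.List.pyGetD lst i [])])
    ([] : List (String × List Int))
  PySem.List.sorted new_lst (fun x => PySem.List.pyGetD x.2 0 0) false

-- ===== PORT B =====
def new_sort_alt (lst : List (List Int)) (color : String) : List (String × List Int) :=
  let st := lst.foldl
    (fun st p =>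
      let cx := PySem.Int.floordiv (PySem.List.pyGetD p 0 0) 4
      let cy := PySem.Int.floordiv (PySem.List.pyGetD p 1 0) 4
      let dup := ([-1, 0, 1] : List Int).foldl
        (fun b dx => ([-1, 0, 1] : List Int).foldl
          (fun b dy => (st.1.getD (cx + dx, cy + dy) ([] : List (List Int))).foldl
            (fun b q =>
              if |PySem.List.pyGetD p 0 0 - PySem.List.pyGetD q 0 0| < 4 ∧
                 |PySem.List.pyGetD p 1 0 - PySem.List.pyGetD q 1 0| < 4
              then true else b) b) b) false
      if dup then st
      else (st.1.modify (cx, cy) [] (fun l => l ++ [p]), st.2 ++ [(color, p)]))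
    ((PySem.Dict.empty : PySem.Dict (Int × Int) (List (List Int))), ([] : List (String × List Int)))
  PySem.List.sorted st.2 (fun x => PySem.List.pyGetD x.2 0 0) false

-- ===== PRECONDITION & SPEC =====
-- Pre_ excludes lists containing an inner list with fewer than 2 coordinates: on those A
-- raises IndexError on most inputs and only returns by accident when every comparison is
-- short-circuited, while B always raises there.
def Pre_new_sort (lst : List (List Int)) (color : String) : Prop :=
  ∀ p ∈ lst, 2 ≤ p.length
instance (lst : List (List Int)) (color : String) : Decidable (Pre_new_sort lst color) := by
  unfold Pre_new_sort; infer_instance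
def pvWitness_new_sort : List (List Int) × String := ([[0, 0], [10, 2], [1, 1]], "g")
def Spec_new_sort (lst : List (List Int)) (color : String) (out : List (String × List Int)) : Prop := out = new_sort_alt lst color
instance (lst : List (List Int)) (color : String) (out : List (String × List Int)) : Decidable (Spec_new_sort lst color out) := by unfold Spec_new_sort; infer_instance

-- ===== CLAIM (what is proved, stated in full; the proofs are below) =====
def Claim_equal_new_sort : Prop := ∀ (lst : List (List Int)) (color : String), Dom_new_sort lst color → Pre_new_sort lst color → Spec_new_sort lst color (new_sort lst color)

-- ===== LEMMAS AND PROOFS =====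

def pvCell (q : List Int) : Int × Int :=
  (PySem.Int.floordiv (PySem.List.pyGetD q 0 0) 4, PySem.Int.floordiv (PySem.List.pyGetD q 1 0) 4)

def stepA (color : String) (acc : List (String × List Int)) (p : List Int) : List (String × List Int) :=
  if acc.any (fun t => decide (|PySem.List.pyGetD p 0 0 - PySem.List.pyGetD t.2 0 0| < 4 ∧
                               |PySem.List.pyGetD p 1 0 - PySem.List.pyGetD t.2 1 0| < 4))
  then acc else acc ++ [(color, p)]

def stepB (color : String)
    (st : PySem.Dict (Int × Int) (List (List Int)) × List (String × List Int)) (p : List Int) :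
    PySem.Dict (Int × Int) (List (List Int)) × List (String × List Int) :=
  if ([-1, 0, 1] : List Int).any (fun dx => ([-1, 0, 1] : List Int).any (fun dy =>
        (st.1.getD ((pvCell p).1 + dx, (pvCell p).2 + dy) []).any
          (fun q => decide (|PySem.List.pyGetD p 0 0 - PySem.List.pyGetD q 0 0| < 4 ∧
                            |PySem.List.pyGetD p 1 0 - PySem.List.pyGetD q 1 0| < 4))))
  then st
  else (st.1.modify (pvCell p) [] (fun l => l ++ [p]), st.2 ++ [(color, p)])

theorem flag_if {β : Type} (l : List β) (Q : β → Prop) [DecidablePred Q] :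
    ∀ b : Bool, l.foldl (fun b y => if Q y then true else b) b = (b || l.any fun y => decide (Q y)) := by
  induction l with
  | nil => intro b; simp
  | cons x xs ih =>
    intro b
    simp only [List.foldl_cons, List.any_cons, ih, ← Bool.or_assoc]
    by_cases h : Q x <;> simp [h]

theorem foldl_flag {α : Type} (l : List α) (f : Bool → α → Bool) (g : α → Bool)
    (h : ∀ b x, f b x = (b || g x)) : ∀ b : Bool, l.foldl f b = (b || l.any g) := by
  induction l with
  | nil => intro b; simp
  | cons x xs ih => intro b; simp only [List.foldl_cons, h, List.any_cons, ih, Bool.or_assoc]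

theorem new_sort_char (lst : List (List Int)) (color : String) :
    new_sort lst color
      = PySem.List.sorted (lst.foldl (stepA color) []) (fun x => PySem.List.pyGetD x.2 0 0) false := by
  simp only [new_sort]
  rw [PySem.List.foldl_pyRange_zero_pyGetD' lst []
    (fun acc p =>
      if (PySem.List.pyRange 0 (acc.length : Int) 1).foldl
        (fun b j =>
          if |PySem.List.pyGetD p 0 0 - PySem.List.pyGetD (PySem.List.pyGetD acc j ("", [])).2 0 0| < 4 ∧
             |PySem.List.pyGetD p 1 0 - PySem.List.pyGetD (PySem.List.pyGetD acc j ("", [])).2 1 0| < 4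
          then true else b) false
      then acc else acc ++ [(color, p)]) []]
  congr 1
  apply List.foldl_ext
  intro acc p _
  rw [PySem.List.foldl_pyRange_zero_pyGetD' acc ("", [])
    (fun b t =>
      if |PySem.List.pyGetD p 0 0 - PySem.List.pyGetD t.2 0 0| < 4 ∧
         |PySem.List.pyGetD p 1 0 - PySem.List.pyGetD t.2 1 0| < 4
      then true else b) false]
  rw [flag_if acc (fun t => |PySem.List.pyGetD p 0 0 - PySem.List.pyGetD t.2 0 0| < 4 ∧
         |PySem.List.pyGetD p 1 0 - PySem.List.pyGetD t.2 1 0| < 4) false]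
  simp only [Bool.false_or, stepA]

theorem new_sort_alt_char (lst : List (List Int)) (color : String) :
    new_sort_alt lst color
      = PySem.List.sorted ((lst.foldl (stepB color) (PySem.Dict.empty, [])).2)
          (fun x => PySem.List.pyGetD x.2 0 0) false := by
  simp only [new_sort_alt]
  congr 2
  apply List.foldl_ext
  intro st p _
  rw [foldl_flag ([-1, 0, 1] : List Int) _
    (fun dx => ([-1, 0, 1] : List Int).any (fun dy =>
      (st.1.getD (PySem.Int.floordiv (PySem.List.pyGetD p 0 0) 4 + dx,
                  PySem.Int.floordiv (PySem.List.pyGetD p 1 0) 4 + dy) []).any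
        (fun q => decide (|PySem.List.pyGetD p 0 0 - PySem.List.pyGetD q 0 0| < 4 ∧
                          |PySem.List.pyGetD p 1 0 - PySem.List.pyGetD q 1 0| < 4))))
    (fun b dx => by
      rw [foldl_flag ([-1, 0, 1] : List Int) _
        (fun dy => (st.1.getD (PySem.Int.floordiv (PySem.List.pyGetD p 0 0) 4 + dx,
                    PySem.Int.floordiv (PySem.List.pyGetD p 1 0) 4 + dy) []).any
          (fun q => decide (|PySem.List.pyGetD p 0 0 - PySem.List.pyGetD q 0 0| < 4 ∧
                            |PySem.List.pyGetD p 1 0 - PySem.List.pyGetD q 1 0| < 4)))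
        (fun b dy =>
          flag_if (st.1.getD (PySem.Int.floordiv (PySem.List.pyGetD p 0 0) 4 + dx,
                    PySem.Int.floordiv (PySem.List.pyGetD p 1 0) 4 + dy) [])
            (fun q => |PySem.List.pyGetD p 0 0 - PySem.List.pyGetD q 0 0| < 4 ∧
                      |PySem.List.pyGetD p 1 0 - PySem.List.pyGetD q 1 0| < 4) b) b]) false]
  simp only [Bool.false_or, stepB, pvCell]

def pvInv (grid : PySem.Dict (Int × Int) (List (List Int))) (kept : List (String × List Int)) : Prop :=
  ∀ c : Int × Int, grid.getD c [] = (kept.map Prod.snd).filter (fun q => decide (pvCell q = c))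

theorem cell_near (a b : Int) (h : |a - b| < 4) :
    ∃ dx ∈ ([-1, 0, 1] : List Int), PySem.Int.floordiv b 4 = PySem.Int.floordiv a 4 + dx := by
  refine ⟨PySem.Int.floordiv b 4 - PySem.Int.floordiv a 4, ?_, by ring⟩
  simp only [PySem.Int.floordiv_eq_ediv_of_pos (show (0:Int) < 4 by norm_num),
    List.mem_cons, List.not_mem_nil, or_false]
  have := abs_lt.mp h
  omega

theorem dup_eq (grid : PySem.Dict (Int × Int) (List (List Int))) (kept : List (String × List Int))
    (hInv : pvInv grid kept) (p : List Int) :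
    (([-1, 0, 1] : List Int).any (fun dx => ([-1, 0, 1] : List Int).any (fun dy =>
        (grid.getD ((pvCell p).1 + dx, (pvCell p).2 + dy) []).any
          (fun q => decide (|PySem.List.pyGetD p 0 0 - PySem.List.pyGetD q 0 0| < 4 ∧
                            |PySem.List.pyGetD p 1 0 - PySem.List.pyGetD q 1 0| < 4)))))
      = kept.any (fun t => decide (|PySem.List.pyGetD p 0 0 - PySem.List.pyGetD t.2 0 0| < 4 ∧
                                   |PySem.List.pyGetD p 1 0 - PySem.List.pyGetD t.2 1 0| < 4)) := by
  unfold pvInv at hInv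
  rw [Bool.eq_iff_iff]
  simp only [List.any_eq_true, hInv, List.mem_filter, List.mem_map, decide_eq_true_eq]
  constructor
  · rintro ⟨dx, _, dy, _, q, ⟨⟨t, ht, rfl⟩, _⟩, hc⟩
    exact ⟨t, ht, hc⟩
  · rintro ⟨t, ht, hc⟩
    obtain ⟨dx, hdx, hx⟩ := cell_near (PySem.List.pyGetD p 0 0) (PySem.List.pyGetD t.2 0 0) hc.1
    obtain ⟨dy, hdy, hy⟩ := cell_near (PySem.List.pyGetD p 1 0) (PySem.List.pyGetD t.2 1 0) hc.2
    exact ⟨dx, hdx, dy, hdy, t.2, ⟨⟨t, ht, rfl⟩, by simp only [pvCell, Prod.mk.injEq]; exact ⟨hx, hy⟩⟩, hc⟩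

theorem inv_step (grid : PySem.Dict (Int × Int) (List (List Int))) (kept : List (String × List Int))
    (hInv : pvInv grid kept) (color : String) (p : List Int) :
    pvInv (grid.modify (pvCell p) [] (fun l => l ++ [p])) (kept ++ [(color, p)]) := by
  unfold pvInv at hInv ⊢
  intro c
  rw [PySem.Dict.getD_modify]
  by_cases hc : c = pvCell p
  · rw [if_pos hc, hInv (pvCell p), hc]
    simp [List.filter_append]
  · rw [if_neg hc, hInv c]
    have hd : decide (pvCell p = c) = false := by simpa using fun h => hc h.symm
    simp [List.filter_append, hd]

theorem loop_eq (color : String) : ∀ (lst : List (List Int))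
    (grid : PySem.Dict (Int × Int) (List (List Int))) (kept : List (String × List Int)),
    pvInv grid kept → (lst.foldl (stepB color) (grid, kept)).2 = lst.foldl (stepA color) kept := by
  intro lst
  induction lst with
  | nil => intro grid kept _; rfl
  | cons p rest ih =>
    intro grid kept hInv
    simp only [List.foldl_cons]
    have hd := dup_eq grid kept hInv p
    unfold stepB stepA
    rw [hd]
    by_cases h : (kept.any (fun t => decide (|PySem.List.pyGetD p 0 0 - PySem.List.pyGetD t.2 0 0| < 4 ∧
                                   |PySem.List.pyGetD p 1 0 - PySem.List.pyGetD t.2 1 0| < 4))) = true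
    · rw [if_pos h, if_pos h]
      exact ih grid kept hInv
    · rw [if_neg h, if_neg h]
      exact ih _ _ (inv_step grid kept hInv color p)

-- ===== VERDICT (by name: the statement is the Claim_ definition above) =====
theorem new_sort_spec : Claim_equal_new_sort := by
  intro lst color _ _
  unfold Spec_new_sort
  rw [new_sort_char, new_sort_alt_char,
    loop_eq color lst PySem.Dict.empty [] (fun c => by simp [PySem.Dict.getD_empty])]
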